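-- pv_equiv track=rewrite | github.com/DAVINTLAB/TweetUtils | modules/cleaner.py | clean_apostrophe_s
-- ===== SOURCE A (Python) =====
-- def clean_apostrophe_s(input):
--     new_list = []
--     for w in input.split(' '):
--         if "'s" in w:
--             new_list.append(w.split("'s")[0])
--         else:
--             new_list.append(w)
--     return ' '.join(new_list)
-- ===== SOURCE B (Python) =====
-- def clean_apostrophe_s(input):
--     # single left-to-right character scan: on "'" followed by "s", skip
--     # everything up to (but not including) the next space, else copy the char
--     out = []
--     i = 0
--     n = len(input)
--     while i < n:
--         c = input[i]
--         if c == "'" and i + 1 < n and input[i + 1] == 's':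
--             i += 1
--             while i < n and input[i] != ' ':
--                 i += 1
--         else:
--             out.append(c)
--             i += 1
--     return ''.join(out)
-- ===== Notes on version B (the rewrite author's own statement) =====
-- stated objective: alternative
-- what changed: Replaced the tokenize(split ' ')/per-word split("'s")/rejoin pipeline with a single left-to-right character scan that copies characters and, at each "'s", skips ahead to the next space.
import Mathlib
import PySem

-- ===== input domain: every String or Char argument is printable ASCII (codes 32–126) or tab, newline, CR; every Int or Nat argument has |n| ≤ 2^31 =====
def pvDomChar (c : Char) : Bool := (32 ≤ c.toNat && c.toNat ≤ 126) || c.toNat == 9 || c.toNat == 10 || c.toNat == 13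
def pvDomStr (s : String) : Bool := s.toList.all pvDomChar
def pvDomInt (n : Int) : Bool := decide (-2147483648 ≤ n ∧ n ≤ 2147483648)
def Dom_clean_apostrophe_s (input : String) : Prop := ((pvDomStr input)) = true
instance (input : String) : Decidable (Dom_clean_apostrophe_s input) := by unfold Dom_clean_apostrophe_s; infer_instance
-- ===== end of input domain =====

-- B replaces A's split-on-space / truncate-each-word / rejoin pipeline with a single
-- left-to-right character scan; an equal-cost alternative decomposition.

-- ===== PORT A =====
-- String operations ported exactly via PySem.Chars.* on input.toList.
def clean_apostrophe_s (input : String) : String :=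
  let newList :=
    (PySem.Chars.splitOn input.toList [' ']).foldl                  -- for w in input.split(' ')
      (fun acc w =>
        if PySem.Chars.isIn ['\'', 's'] w then                      -- if "'s" in w
          acc ++ [PySem.List.pyGetD (PySem.Chars.splitOn w ['\'', 's']) 0 []]  -- w.split("'s")[0]
        else
          acc ++ [w]) []
  String.ofList (PySem.Chars.join [' '] newList)                    -- ' '.join(new_list)

-- ===== PORT B =====
-- the outer while loop of Source B: copy input[i], except at "'s" skip to the next space
-- (the two-char test input[i]=="'" and input[i+1]=='s' is the isPrefixOf check;
--  the inner while loop advancing i to the next space is the dropWhile; exact step for step)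
def scanB : List Char → List Char
  | [] => []
  | c :: rest =>
    if ['\'', 's'].isPrefixOf (c :: rest) then
      scanB (rest.dropWhile (fun x => x ≠ ' '))
    else
      c :: scanB rest
termination_by l => l.length
decreasing_by
  · have := List.length_dropWhile_le (fun x => x ≠ ' ') rest; simpa using Nat.lt_succ_of_le this
  · simp

def clean_apostrophe_s_alt (input : String) : String :=
  String.ofList (scanB input.toList)

-- ===== PRECONDITION & SPEC =====
def Spec_clean_apostrophe_s (input : String) (out : String) : Prop := out = clean_apostrophe_s_alt input
instance (input : String) (out : String) : Decidable (Spec_clean_apostrophe_s input out) := by unfold Spec_clean_apostrophe_s; infer_instance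

-- ===== CLAIM (what is proved, stated in full; the proofs are below) =====
def Claim_equal_clean_apostrophe_s : Prop := ∀ (input : String), Dom_clean_apostrophe_s input → Spec_clean_apostrophe_s input (clean_apostrophe_s input)

-- ===== LEMMAS AND PROOFS =====

-- the part of a word strictly before its first "'s" (the whole word if none)
def before : List Char → List Char
  | [] => []
  | c :: t => if ['\'', 's'].isPrefixOf (c :: t) then [] else c :: before t

-- reference shape of Python's split(' ')
def mySplit : List Char → List (List Char)
  | [] => [[]]
  | c :: t =>
    if c = ' ' then [] :: mySplit t
    else
      match mySplit t with
      | [] => [[c]]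
      | w :: ws => (c :: w) :: ws

def prependW (x : List Char) : List (List Char) → List (List Char)
  | [] => [x]
  | w :: ws => (x ++ w) :: ws

theorem mySplit_ne_nil (l : List Char) : mySplit l ≠ [] := by
  cases l with
  | nil => simp [mySplit]
  | cons c t =>
    simp only [mySplit]
    split_ifs
    · simp
    · cases h : mySplit t <;> simp

theorem go_acc (sep : List Char) (fuel : Nat) : ∀ (l cur : List Char) (acc : List (List Char)),
    PySem.Chars.splitOn.go sep fuel l cur acc =
      acc.reverse ++ PySem.Chars.splitOn.go sep fuel l cur [] := by
  induction fuel with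
  | zero => intro l cur acc; simp [PySem.Chars.splitOn.go]
  | succ n ih =>
    intro l cur acc
    cases l with
    | nil => simp [PySem.Chars.splitOn.go]
    | cons c rest =>
      simp only [PySem.Chars.splitOn.go]
      split_ifs with h
      · rw [ih ((c::rest).drop sep.length) [] (cur.reverse :: acc),
            ih ((c::rest).drop sep.length) [] [cur.reverse]]
        simp
      · exact ih rest (c :: cur) acc

theorem goHead (fuel : Nat) : ∀ (l cur : List Char), l.length ≤ fuel →
    (PySem.Chars.splitOn.go ['\'', 's'] fuel l cur []).head? = some (cur.reverse ++ before l) := by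
  induction fuel with
  | zero =>
    intro l cur h
    have : l = [] := List.eq_nil_of_length_eq_zero (Nat.le_zero.mp h)
    subst this; simp [PySem.Chars.splitOn.go, before]
  | succ n ih =>
    intro l cur h
    cases l with
    | nil => simp [PySem.Chars.splitOn.go, before]
    | cons c rest =>
      simp only [PySem.Chars.splitOn.go, before]
      split_ifs with hp
      · rw [go_acc]
        simp
      · rw [ih rest (c :: cur) (by simpa using Nat.le_of_succ_le_succ h)]
        simp

theorem splitOn_head (w : List Char) :
    (PySem.Chars.splitOn w ['\'', 's']).head? = some (before w) := by
  have := goHead (w.length + 1) w [] (Nat.le_succ _)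
  simpa [PySem.Chars.splitOn] using this

theorem pyGetD_zero_head {xs : List (List Char)} {a : List Char} (h : xs.head? = some a) :
    PySem.List.pyGetD xs 0 [] = a := by
  cases xs with
  | nil => simp at h
  | cons x t => simp [PySem.List.pyGetD, PySem.List.pyGet?, PySem.List.pyIdx?] at h ⊢; exact h

theorem before_of_not_isIn : ∀ {w : List Char}, PySem.Chars.isIn ['\'', 's'] w = false →
    before w = w := by
  intro w
  induction w with
  | nil => intro _; rfl
  | cons c t ih =>
    intro h
    rw [before]
    rw [PySem.Chars.isIn_eq_false_iff] at h
    have hp : ¬ ['\'', 's'].isPrefixOf (c :: t) = true := by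
      intro hp
      exact h ((List.isPrefixOf_iff_prefix.mp hp).isInfix)
    rw [if_neg hp, ih ((PySem.Chars.isIn_eq_false_iff _ _).mpr
      (fun hi => h ((List.infix_cons_iff.mpr (Or.inr hi) : _ <:+: c :: t))))]

theorem goSpace (fuel : Nat) : ∀ (l cur : List Char), l.length ≤ fuel →
    PySem.Chars.splitOn.go [' '] fuel l cur [] = prependW cur.reverse (mySplit l) := by
  induction fuel with
  | zero =>
    intro l cur h
    have : l = [] := List.eq_nil_of_length_eq_zero (Nat.le_zero.mp h)
    subst this; simp [PySem.Chars.splitOn.go, mySplit, prependW]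
  | succ n ih =>
    intro l cur h
    cases l with
    | nil => simp [PySem.Chars.splitOn.go, mySplit, prependW]
    | cons c rest =>
      have hr : rest.length ≤ n := by simpa using Nat.le_of_succ_le_succ h
      simp only [PySem.Chars.splitOn.go, mySplit]
      by_cases hc : c = ' '
      · rw [if_pos (by simp [List.isPrefixOf, hc]), if_pos hc]
        rw [go_acc]
        show [cur.reverse].reverse ++ PySem.Chars.splitOn.go [' '] n rest [] [] = _
        rw [ih rest [] hr]
        cases hms : mySplit rest with
        | nil => exact absurd hms (mySplit_ne_nil rest)
        | cons w ws => simp [prependW]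
      · rw [if_neg (by simp [List.isPrefixOf]; exact fun h' => absurd h'.symm hc), if_neg hc]
        rw [ih rest (c :: cur) hr]
        cases hms : mySplit rest with
        | nil => exact absurd hms (mySplit_ne_nil rest)
        | cons w ws => simp [prependW]

theorem splitOn_space_eq (cs : List Char) : PySem.Chars.splitOn cs [' '] = mySplit cs := by
  have := goSpace (cs.length + 1) cs [] (Nat.le_succ _)
  cases hms : mySplit cs with
  | nil => exact absurd hms (mySplit_ne_nil cs)
  | cons w ws => simpa [PySem.Chars.splitOn, prependW, hms] using this

theorem mySplit_word : ∀ {w : List Char}, ' ' ∉ w → mySplit w = [w] := by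
  intro w
  induction w with
  | nil => intro _; rfl
  | cons c t ih =>
    intro h
    rw [mySplit.eq_def]
    simp only []
    rw [if_neg (by simp at h; exact fun hc => h.1 hc.symm)]
    rw [ih (by simp at h; exact h.2)]

theorem mySplit_append : ∀ {w : List Char} (rest : List Char), ' ' ∉ w →
    mySplit (w ++ ' ' :: rest) = w :: mySplit rest := by
  intro w
  induction w with
  | nil => intro rest _; simp [mySplit]
  | cons c t ih =>
    intro rest h
    simp only [List.cons_append, mySplit]
    rw [if_neg (by simp at h; exact fun hc => h.1 hc.symm)]
    rw [ih rest (by simp at h; exact h.2)]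

theorem dropW : ∀ {w : List Char} (rest : List Char), ' ' ∉ w →
    (w ++ ' ' :: rest).dropWhile (fun x => x ≠ ' ') = ' ' :: rest := by
  intro w
  induction w with
  | nil => intro rest _; simp
  | cons c t ih =>
    intro rest h
    simp only [List.cons_append, List.dropWhile_cons]
    simp at h
    rw [if_pos (by simp; exact fun hc => h.1 hc.symm)]
    exact ih rest h.2

theorem prefix_cut {c : Char} {t r : List Char} (h : ' ' ∉ t) :
    ['\'', 's'].isPrefixOf (c :: (t ++ ' ' :: r)) = ['\'', 's'].isPrefixOf (c :: t) := by
  cases t with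
  | nil => simp [List.isPrefixOf]
  | cons d u => simp [List.isPrefixOf]

theorem scanB_word : ∀ {w : List Char}, ' ' ∉ w → scanB w = before w := by
  intro w
  induction hn : w.length using Nat.strong_induction_on generalizing w with
  | _ n ih =>
  cases w with
  | nil => intro _; simp [scanB, before]
  | cons c t =>
    intro h
    simp at h
    rw [scanB, before]
    split_ifs with hp
    · have hd : t.dropWhile (fun x => x ≠ ' ') = [] :=
        List.dropWhile_eq_nil_iff.mpr (by intro x hx; simp; exact fun hc => h.2 (hc ▸ hx))
      rw [hd]; simp [scanB]
    · subst hn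
      rw [ih t.length (by simp) (w := t) rfl h.2]

theorem scanB_append : ∀ {w : List Char} (rest : List Char), ' ' ∉ w →
    scanB (w ++ ' ' :: rest) = before w ++ ' ' :: scanB rest := by
  intro w
  induction w with
  | nil =>
    intro rest _
    rw [List.nil_append, scanB, if_neg (by simp [List.isPrefixOf])]
    simp [before]
  | cons c t ih =>
    intro rest h
    simp at h
    rw [List.cons_append, scanB, before]
    rw [prefix_cut h.2]
    split_ifs with hp
    · rw [dropW rest h.2]
      rw [scanB, if_neg (by simp [List.isPrefixOf])]
      simp
    · rw [ih rest h.2]; simp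

theorem join_cons {x : List Char} {ms : List (List Char)} (h : ms ≠ []) :
    PySem.Chars.join [' '] (x :: ms) = x ++ ' ' :: PySem.Chars.join [' '] ms := by
  cases ms with
  | nil => exact absurd rfl h
  | cons y t => rw [PySem.Chars.join_cons_cons]; simp

theorem decomp (cs : List Char) :
    (' ' ∉ cs) ∨ ∃ w r, ' ' ∉ w ∧ cs = w ++ ' ' :: r := by
  induction cs with
  | nil => left; simp
  | cons c t ih =>
    by_cases hc : c = ' '
    · right; exact ⟨[], t, by simp, by simp [hc]⟩
    · cases ih with
      | inl h => left; simp; exact ⟨fun e => hc e.symm, h⟩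
      | inr h =>
        obtain ⟨w, r, hw, rfl⟩ := h
        right
        exact ⟨c :: w, r, by simp; exact ⟨fun e => hc e.symm, hw⟩, rfl⟩

theorem main_eq (cs : List Char) :
    scanB cs = PySem.Chars.join [' '] ((mySplit cs).map before) := by
  induction hn : cs.length using Nat.strong_induction_on generalizing cs with
  | _ n ih =>
  subst hn
  cases decomp cs with
  | inl hw =>
    rw [mySplit_word hw, List.map_cons, List.map_nil, PySem.Chars.join_singleton]
    exact scanB_word hw
  | inr h =>
    obtain ⟨w, r, hw, rfl⟩ := h
    rw [mySplit_append r hw, List.map_cons, join_cons (by simp [mySplit_ne_nil])]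
    rw [scanB_append r hw]
    rw [ih r.length (by simp; omega) (cs := r) rfl]

-- ===== VERDICT (by name: the statement is the Claim_ definition above) =====
theorem clean_apostrophe_s_spec : Claim_equal_clean_apostrophe_s := by
  intro input _
  unfold Spec_clean_apostrophe_s clean_apostrophe_s clean_apostrophe_s_alt
  have hstep : ∀ (acc : List (List Char)) (w : List Char),
      (if PySem.Chars.isIn ['\'', 's'] w then
        acc ++ [PySem.List.pyGetD (PySem.Chars.splitOn w ['\'', 's']) 0 []]
      else acc ++ [w]) = acc ++ [before w] := by
    intro acc w
    by_cases hi : PySem.Chars.isIn ['\'', 's'] w = true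
    · rw [if_pos hi, pyGetD_zero_head (splitOn_head w)]
    · rw [if_neg hi, before_of_not_isIn (Bool.not_eq_true _ ▸ hi)]
  show String.ofList (PySem.Chars.join [' '] _) = _
  have hfold := PySem.List.foldl_congr_mem
      (l := PySem.Chars.splitOn input.toList [' '])
      (init := ([] : List (List Char)))
      (f := fun acc w =>
        if PySem.Chars.isIn ['\'', 's'] w then
          acc ++ [PySem.List.pyGetD (PySem.Chars.splitOn w ['\'', 's']) 0 []]
        else acc ++ [w])
      (g := fun acc w => acc ++ [before w])
      (fun acc w _ => hstep acc w)
  rw [hfold]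
  rw [PySem.List.foldl_append_singleton_eq_map, List.nil_append]
  rw [splitOn_space_eq, ← main_eq]
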